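-- pv_equiv track=rewrite | github.com/withyeah/TodayILearned | Algorithm/Lecture_exercise_code/20190326/베이비진게임.py | babygin
-- ===== SOURCE A (Python) =====
-- def babygin(llist):
--     if len(llist) >= 3:
--         llist.sort()
--         for i in range(len(llist)-2):
--             if llist[i] == llist[i+1] == llist[i+2]: return True
--         setlist = sorted(list(set(llist)))
--         for i in range(len(setlist) - 2):
--             if setlist[i] + 1 == setlist[i+1] and setlist[i+1] + 1 == setlist[i+2]: return True
--         return False
-- ===== SOURCE B (Python) =====
-- def babygin(llist):
--     # value-based check: a triple exists iff some value occurs >= 3 times,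
--     # a run exists iff some value v has v+1 and v+2 present.
--     if len(llist) >= 3:
--         llist.sort()  # kept so the caller observes the same in-place mutation as A
--         vals = set(llist)
--         if any(llist.count(v) >= 3 for v in vals):
--             return True
--         return any(v + 1 in vals and v + 2 in vals for v in vals)
-- ===== Notes on version B (the rewrite author's own statement) =====
-- stated objective: alternative
-- what changed: Replaces A's two scans over sorted lists (adjacent-triple scan and consecutive-run scan over sorted(set(...))) with a value-based check: some value occurs >= 3 times, or some value v has v+1 and v+2 present in the value set; B keeps the in-place sort so the caller observes the same mutation.
import Mathlib
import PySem

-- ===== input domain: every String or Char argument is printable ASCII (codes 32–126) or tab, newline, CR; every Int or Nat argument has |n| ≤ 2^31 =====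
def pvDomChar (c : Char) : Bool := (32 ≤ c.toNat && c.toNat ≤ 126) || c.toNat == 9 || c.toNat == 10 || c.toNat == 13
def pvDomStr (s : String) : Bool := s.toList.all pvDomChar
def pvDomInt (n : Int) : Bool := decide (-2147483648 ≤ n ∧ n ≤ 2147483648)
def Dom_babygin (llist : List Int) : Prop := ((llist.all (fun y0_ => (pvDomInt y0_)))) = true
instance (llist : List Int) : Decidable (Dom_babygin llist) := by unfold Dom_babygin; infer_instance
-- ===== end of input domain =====

-- B differs from A by checking value multiplicities / value-set membership instead of
-- scanning sorted lists; both sort the argument in place, the proof is about the return value.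

-- ===== PORT A =====
-- 'for i in range(len(l)-2): if l[i]==l[i+1]==l[i+2]: return True' — the index loop scans
-- consecutive windows of 3; rendered as structural recursion over the same windows (exact).
def pvScanTriple : List Int → Bool
  | a :: b :: c :: t => (a == b && b == c) || pvScanTriple (b :: c :: t)
  | _ => false

-- 'for i in range(len(setlist)-2): if setlist[i]+1==setlist[i+1] and setlist[i+1]+1==setlist[i+2]'
def pvScanRun : List Int → Bool
  | a :: b :: c :: t => (a + 1 == b && b + 1 == c) || pvScanRun (b :: c :: t)
  | _ => false

def babygin (llist : List Int) : Option Bool :=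
  if 3 ≤ llist.length then
    let l := PySem.List.sorted llist (fun x => x)
    if pvScanTriple l then some true
    else
      let setlist := PySem.List.sorted (PySem.Set.ofList l) (fun x => x)
      if pvScanRun setlist then some true else some false
  else none

-- ===== PORT B =====
def babygin_alt (llist : List Int) : Option Bool :=
  if 3 ≤ llist.length then
    let l := PySem.List.sorted llist (fun x => x)
    let vals := PySem.Set.ofList l
    if vals.any (fun v => 3 ≤ PySem.List.count l v) then some true
    else some (vals.any (fun v =>
      PySem.Set.contains vals (v + 1) && PySem.Set.contains vals (v + 2)))
  else none

-- ===== PRECONDITION & SPEC =====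
def Spec_babygin (llist : List Int) (out : Option Bool) : Prop := out = babygin_alt llist
instance (llist : List Int) (out : Option Bool) : Decidable (Spec_babygin llist out) := by unfold Spec_babygin; infer_instance

-- ===== CLAIM (what is proved, stated in full; the proofs are below) =====
def Claim_equal_babygin : Prop := ∀ (llist : List Int), Dom_babygin llist → Spec_babygin llist (babygin llist)

-- ===== LEMMAS AND PROOFS =====

theorem pvScanTriple_cons (a : Int) (t : List Int) (h : pvScanTriple t = true) :
    pvScanTriple (a :: t) = true := by
  match t with
  | b :: c :: u => simp [pvScanTriple] at h ⊢; tauto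
  | [] => simp [pvScanTriple] at h
  | [b] => simp [pvScanTriple] at h

theorem pvScanRun_cons (a : Int) (t : List Int) (h : pvScanRun t = true) :
    pvScanRun (a :: t) = true := by
  match t with
  | b :: c :: u => simp [pvScanRun] at h ⊢; tauto
  | [] => simp [pvScanRun] at h
  | [b] => simp [pvScanRun] at h

theorem pvScanTriple_of_count (l : List Int) (hs : l.Pairwise (· ≤ ·)) (v : Int)
    (h : 3 ≤ l.count v) : pvScanTriple l = true := by
  induction l generalizing v with
  | nil => simp at h
  | cons a t ih =>
    rcases hs with _ | ⟨ha, hst⟩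
    by_cases hva : v = a
    · subst hva
      rw [List.count_cons_self] at h
      have hmem2 : 2 ≤ t.count v := by omega
      match t, ha, hst, hmem2 with
      | b :: u, ha, hst, hmem2 =>
        have hvb : v = b := by
          by_cases hvb : v = b
          · exact hvb
          · rw [List.count_cons_of_ne (Ne.symm hvb)] at hmem2
            have hvmem : v ∈ u := List.count_pos_iff.mp (by omega)
            rcases hst with _ | ⟨hb, _⟩
            have := hb v hvmem
            have := ha b (List.mem_cons_self)
            omega
        subst hvb
        rw [List.count_cons_self] at hmem2
        match u, hst, hmem2 with
        | c :: w, hst, hmem2 =>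
          have hvc : v = c := by
            by_cases hvc : v = c
            · exact hvc
            · rw [List.count_cons_of_ne (Ne.symm hvc)] at hmem2
              have hvmem : v ∈ w := List.count_pos_iff.mp (by omega)
              rcases hst with _ | ⟨hb, hsw⟩
              rcases hsw with _ | ⟨hc, _⟩
              have := hc v hvmem
              have := hb c (List.mem_cons_self)
              omega
          subst hvc
          simp [pvScanTriple]
    · rw [List.count_cons_of_ne (Ne.symm hva)] at h
      exact pvScanTriple_cons a t (ih hst v h)

theorem count_of_pvScanTriple (l : List Int) (h : pvScanTriple l = true) :
    ∃ v, 3 ≤ l.count v := by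
  induction l with
  | nil => simp [pvScanTriple] at h
  | cons a t ih =>
    match t, h, ih with
    | b :: c :: u, h, ih =>
      simp only [pvScanTriple, Bool.or_eq_true, Bool.and_eq_true, beq_iff_eq] at h
      rcases h with ⟨hab, hbc⟩ | h
      · refine ⟨a, ?_⟩
        subst hab; subst hbc
        rw [List.count_cons_self, List.count_cons_self, List.count_cons_self]
        omega
      · obtain ⟨v, hv⟩ := ih h
        exact ⟨v, le_trans hv (by simp only [List.count_cons]; omega)⟩
    | [], h, _ => simp [pvScanTriple] at h
    | [b], h, _ => simp [pvScanTriple] at h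

theorem pvScanRun_of_mem (l : List Int) (hs : l.Pairwise (· < ·)) (v : Int)
    (h0 : v ∈ l) (h1 : v + 1 ∈ l) (h2 : v + 2 ∈ l) : pvScanRun l = true := by
  induction l with
  | nil => simp at h0
  | cons a t ih =>
    rcases hs with _ | ⟨ha, hst⟩
    by_cases hva : v = a
    · subst hva
      have h1t : v + 1 ∈ t := by
        rcases List.mem_cons.mp h1 with heq | h1t
        · omega
        · exact h1t
      have h2t : v + 2 ∈ t := by
        rcases List.mem_cons.mp h2 with heq | h2t
        · omega
        · exact h2t
      match t, ha, hst, h1t, h2t with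
      | b :: u, ha, hst, h1t, h2t =>
        have hb : b = v + 1 := by
          rcases List.mem_cons.mp h1t with heq | h1u
          · omega
          · rcases hst with _ | ⟨hbu, _⟩
            have := hbu _ h1u
            have := ha b (List.mem_cons_self)
            omega
        subst hb
        have h2u : v + 2 ∈ u := by
          rcases List.mem_cons.mp h2t with heq | h2u
          · omega
          · exact h2u
        match u, hst, h2u with
        | c :: w, hst, h2u =>
          have hc : c = v + 2 := by
            rcases List.mem_cons.mp h2u with heq | h2w
            · omega
            · rcases hst with _ | ⟨hbu, hsw⟩
              rcases hsw with _ | ⟨hcw, _⟩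
              have := hcw _ h2w
              have := hbu c (List.mem_cons_self)
              omega
          subst hc
          simp only [pvScanRun, Bool.or_eq_true, Bool.and_eq_true, beq_iff_eq]
          exact Or.inl ⟨trivial, by omega⟩
    · have h0t : v ∈ t := by
        rcases List.mem_cons.mp h0 with heq | h0t
        · omega
        · exact h0t
      have hav : a < v := ha v h0t
      have h1t : v + 1 ∈ t := by
        rcases List.mem_cons.mp h1 with heq | h1t
        · omega
        · exact h1t
      have h2t : v + 2 ∈ t := by
        rcases List.mem_cons.mp h2 with heq | h2t
        · omega
        · exact h2t
      exact pvScanRun_cons a t (ih hst h0t h1t h2t)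

theorem mem_of_pvScanRun (l : List Int) (h : pvScanRun l = true) :
    ∃ v ∈ l, v + 1 ∈ l ∧ v + 2 ∈ l := by
  induction l with
  | nil => simp [pvScanRun] at h
  | cons a t ih =>
    match t, h, ih with
    | b :: c :: u, h, ih =>
      simp only [pvScanRun, Bool.or_eq_true, Bool.and_eq_true, beq_iff_eq] at h
      rcases h with ⟨hab, hbc⟩ | h
      · refine ⟨a, List.mem_cons_self, ?_, ?_⟩ <;> (simp only [List.mem_cons]; omega)
      · obtain ⟨v, hv0, hv1, hv2⟩ := ih h
        exact ⟨v, List.mem_cons_of_mem a hv0, List.mem_cons_of_mem a hv1, List.mem_cons_of_mem a hv2⟩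
    | [], h, _ => simp [pvScanRun] at h
    | [b], h, _ => simp [pvScanRun] at h

-- ===== VERDICT (by name: the statement is the Claim_ definition above) =====
theorem babygin_spec : Claim_equal_babygin := by
  intro llist _
  unfold Spec_babygin babygin babygin_alt
  by_cases hlen : 3 ≤ llist.length
  · simp only [if_pos hlen]
    have hpair : (PySem.List.sorted llist (fun x => x)).Pairwise (· ≤ ·) :=
      PySem.List.sorted_pairwise llist (fun x => x)
    have hT : pvScanTriple (PySem.List.sorted llist (fun x => x)) =
        (PySem.Set.ofList (PySem.List.sorted llist (fun x => x))).any
          (fun v => decide (3 ≤ PySem.List.count (PySem.List.sorted llist (fun x => x)) v)) := by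
      rw [Bool.eq_iff_iff]
      constructor
      · intro h
        obtain ⟨v, hv⟩ := count_of_pvScanTriple _ h
        have hm : v ∈ PySem.List.sorted llist (fun x => x) := List.count_pos_iff.mp (by omega)
        refine List.any_eq_true.mpr ⟨v, (PySem.Set.mem_ofList _ _).mpr hm, ?_⟩
        rw [PySem.List.count_eq]
        exact decide_eq_true hv
      · intro h
        obtain ⟨v, _, hp⟩ := List.any_eq_true.mp h
        rw [PySem.List.count_eq] at hp
        exact pvScanTriple_of_count _ hpair v (of_decide_eq_true hp)
    have hR : pvScanRun (PySem.List.sorted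
          (PySem.Set.ofList (PySem.List.sorted llist (fun x => x))) (fun x => x)) =
        (PySem.Set.ofList (PySem.List.sorted llist (fun x => x))).any
          (fun v => PySem.Set.contains (PySem.Set.ofList (PySem.List.sorted llist (fun x => x))) (v + 1) &&
            PySem.Set.contains (PySem.Set.ofList (PySem.List.sorted llist (fun x => x))) (v + 2)) := by
      rw [Bool.eq_iff_iff]
      have hmem : ∀ x : Int, x ∈ PySem.List.sorted
          (PySem.Set.ofList (PySem.List.sorted llist (fun x => x))) (fun x => x) ↔
          x ∈ PySem.Set.ofList (PySem.List.sorted llist (fun x => x)) := by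
        intro x; exact PySem.List.mem_sorted _ _ _ x
      constructor
      · intro h
        obtain ⟨v, hv0, hv1, hv2⟩ := mem_of_pvScanRun _ h
        refine List.any_eq_true.mpr ⟨v, (hmem v).mp hv0, ?_⟩
        rw [Bool.and_eq_true, PySem.Set.contains_iff, PySem.Set.contains_iff]
        exact ⟨(hmem _).mp hv1, (hmem _).mp hv2⟩
      · intro h
        obtain ⟨v, hv0, hp⟩ := List.any_eq_true.mp h
        rw [Bool.and_eq_true, PySem.Set.contains_iff, PySem.Set.contains_iff] at hp
        exact pvScanRun_of_mem _ (PySem.List.sorted_ofList_pairwise_lt _) v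
          ((hmem v).mpr hv0) ((hmem _).mpr hp.1) ((hmem _).mpr hp.2)
    rw [hT, hR]
    cases hA1 : (PySem.Set.ofList (PySem.List.sorted llist (fun x => x))).any
        (fun v => decide (3 ≤ PySem.List.count (PySem.List.sorted llist (fun x => x)) v)) <;>
      cases hA2 : (PySem.Set.ofList (PySem.List.sorted llist (fun x => x))).any
          (fun v => PySem.Set.contains (PySem.Set.ofList (PySem.List.sorted llist (fun x => x))) (v + 1) &&
            PySem.Set.contains (PySem.Set.ofList (PySem.List.sorted llist (fun x => x))) (v + 2)) <;>
        simp
  · simp only [if_neg hlen]
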